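-- pv_equiv track=rewrite | github.com/virginiasatyro/learning-python | automatize-tarefas/PARTE I - Basico Python/CAP 4 - Listas/codigo_virgulas.py | virgulas
-- ===== SOURCE A (Python) =====
-- def virgulas(lista):
-- 	string_aux = ''
-- 	for i in range(len(lista)):
-- 		if i == (len(lista) - 1):
-- 			string_aux = string_aux + lista[i]
-- 		elif i == (len(lista) - 2):
-- 			string_aux = string_aux + lista[i] + ' and '
-- 		else:
-- 			string_aux = string_aux + lista[i] + ', '
-- 	return string_aux
-- ===== SOURCE B (Python) =====
-- def virgulas(lista):
--     if len(lista) < 2: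
--         return ''.join(lista)
--     return ', '.join(lista[:-1]) + ' and ' + lista[-1]
-- ===== Notes on version B (the rewrite author's own statement) =====
-- stated objective: simpler
-- what changed: Replaces A's index loop with position-dependent branches and repeated string concatenation by a guard for len<2 plus a slice-and-join: ', '.join(lista[:-1]) + ' and ' + lista[-1].
import Mathlib
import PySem

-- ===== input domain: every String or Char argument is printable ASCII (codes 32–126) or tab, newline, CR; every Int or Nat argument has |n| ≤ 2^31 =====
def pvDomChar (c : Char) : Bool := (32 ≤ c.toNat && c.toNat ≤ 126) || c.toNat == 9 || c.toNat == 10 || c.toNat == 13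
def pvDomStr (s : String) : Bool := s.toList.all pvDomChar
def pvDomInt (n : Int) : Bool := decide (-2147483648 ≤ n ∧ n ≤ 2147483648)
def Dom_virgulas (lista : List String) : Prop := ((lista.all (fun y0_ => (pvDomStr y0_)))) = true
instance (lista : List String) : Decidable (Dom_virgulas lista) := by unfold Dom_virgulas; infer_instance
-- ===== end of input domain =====

-- B replaces A's index-by-index loop with last-two special-casing by a slice-and-join
-- decomposition (', '.join(lista[:-1]) + ' and ' + lista[-1]); objective: simpler.

-- ===== PORT A =====
def virgulas (lista : List String) : String :=
  (PySem.List.pyRange 0 (PySem.List.len lista) 1).foldl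
    (fun string_aux i =>
      if i = PySem.List.len lista - 1 then
        string_aux ++ PySem.List.pyGetD lista i ""
      else if i = PySem.List.len lista - 2 then
        string_aux ++ PySem.List.pyGetD lista i "" ++ " and "
      else
        string_aux ++ PySem.List.pyGetD lista i "" ++ ", ") ""

-- ===== PORT B =====
def virgulas_alt (lista : List String) : String :=
  if PySem.List.len lista < 2 then
    PySem.Str.join "" lista
  else
    PySem.Str.join ", " (PySem.List.slice lista none (some (-1))) ++ " and "
      ++ PySem.List.pyGetD lista (-1) ""

-- ===== PRECONDITION & SPEC =====
def Spec_virgulas (lista : List String) (out : String) : Prop := out = virgulas_alt lista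
instance (lista : List String) (out : String) : Decidable (Spec_virgulas lista out) := by unfold Spec_virgulas; infer_instance

-- ===== CLAIM (what is proved, stated in full; the proofs are below) =====
def Claim_equal_virgulas : Prop := ∀ (lista : List String), Dom_virgulas lista → Spec_virgulas lista (virgulas lista)

-- ===== LEMMAS AND PROOFS =====

-- A's per-index piece: the string appended to the accumulator at index i.
def pieceA (lista : List String) (i : Int) : String :=
  if i = PySem.List.len lista - 1 then PySem.List.pyGetD lista i ""
  else if i = PySem.List.len lista - 2 then PySem.List.pyGetD lista i "" ++ " and "
  else PySem.List.pyGetD lista i "" ++ ", "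

theorem virgulas_eq_fold (lista : List String) :
    virgulas lista =
      (PySem.List.pyRange 0 (PySem.List.len lista) 1).foldl
        (fun s i => s ++ pieceA lista i) "" := by
  unfold virgulas pieceA
  congr 1
  funext s i
  split_ifs <;> simp [String.append_assoc]

theorem foldl_str_shift (g : Int → String) (l : List Int) :
    ∀ (s : String), l.foldl (fun s i => s ++ g i) s = s ++ l.foldl (fun s i => s ++ g i) "" := by
  induction l with
  | nil => simp
  | cons x t ih =>
    intro s
    simp only [List.foldl_cons]
    rw [ih (s ++ g x), ih ("" ++ g x)]
    simp [String.append_assoc]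

theorem pieceA_shift (a : String) (rest : List String) (k : Nat) :
    pieceA (a :: rest) (1 + (k : Int)) = pieceA rest ((k : Int)) := by
  unfold pieceA
  have h1 : (1 + (k : Int)) = ((k + 1 : Nat) : Int) := by push_cast; ring
  have hget : PySem.List.pyGetD (a :: rest) (1 + (k : Int)) "" = PySem.List.pyGetD rest (k : Int) "" := by
    rw [h1, PySem.List.pyGetD_natCast, PySem.List.pyGetD_natCast]
    simp
  have hlen : PySem.List.len (a :: rest) = PySem.List.len rest + 1 := by
    simp [PySem.List.len_eq]
  rw [hget, hlen]
  have c1 : (1 + (k : Int) = PySem.List.len rest + 1 - 1) ↔ ((k : Int) = PySem.List.len rest - 1) := by omega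
  have c2 : (1 + (k : Int) = PySem.List.len rest + 1 - 2) ↔ ((k : Int) = PySem.List.len rest - 2) := by omega
  split_ifs with h h' h'' <;> simp_all

-- A on a :: rest, rest of length ≥ 2, prepends "a, " and recurses on rest.
theorem virgulas_cons (a : String) (rest : List String) (h : 2 ≤ rest.length) :
    virgulas (a :: rest) = a ++ ", " ++ virgulas rest := by
  rw [virgulas_eq_fold, virgulas_eq_fold]
  have hn : PySem.List.len (a :: rest) = (rest.length : Int) + 1 := by
    simp [PySem.List.len_eq]
  have h0 : (0 : Int) < PySem.List.len (a :: rest) := by rw [hn]; omega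
  rw [PySem.List.pyRange_one_cons h0]
  simp only [List.foldl_cons]
  rw [foldl_str_shift]
  have hp0 : pieceA (a :: rest) 0 = a ++ ", " := by
    unfold pieceA
    rw [hn]
    have : ¬ ((0 : Int) = (rest.length : Int) + 1 - 1) := by omega
    have : ¬ ((0 : Int) = (rest.length : Int) + 1 - 2) := by omega
    simp_all [PySem.List.pyGetD_zero_cons]
  have htail :
      (PySem.List.pyRange 1 (PySem.List.len (a :: rest)) 1).foldl
          (fun s i => s ++ pieceA (a :: rest) i) "" =
      (PySem.List.pyRange 0 (PySem.List.len rest) 1).foldl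
          (fun s i => s ++ pieceA rest i) "" := by
    have hr : PySem.List.len rest = (rest.length : Int) := by simp [PySem.List.len_eq]
    rw [PySem.List.pyRange_one 1 (PySem.List.len (a :: rest)),
        PySem.List.pyRange_one 0 (PySem.List.len rest)]
    have hlen1 : (PySem.List.len (a :: rest) - 1).toNat = rest.length := by
      rw [hn]; omega
    have hlen2 : (PySem.List.len rest - 0).toNat = rest.length := by
      rw [hr]; omega
    rw [hlen1, hlen2, List.foldl_map, List.foldl_map]
    congr 1
    funext s k
    rw [pieceA_shift]
    simp
  simp only [zero_add]
  rw [htail, hp0]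
  simp [String.append_assoc]

theorem join_cons_of_ne_nil (a : String) (m : List String) (hm : m ≠ []) :
    PySem.Str.join ", " (a :: m) = a ++ ", " ++ PySem.Str.join ", " m := by
  obtain ⟨b, t, rfl⟩ : ∃ b t, m = b :: t := by
    cases m with
    | nil => exact absurd rfl hm
    | cons b t => exact ⟨b, t, rfl⟩
  apply String.toList_inj.mp
  simp [PySem.Str.join, PySem.Chars.join_cons_cons]

-- B on a :: rest, rest of length ≥ 2, prepends "a, " and recurses on rest.
theorem virgulas_alt_cons (a : String) (rest : List String) (h : 2 ≤ rest.length) :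
    virgulas_alt (a :: rest) = a ++ ", " ++ virgulas_alt rest := by
  have hne : rest ≠ [] := by intro hr; simp [hr] at h
  unfold virgulas_alt
  have h1 : ¬ (PySem.List.len (a :: rest) < 2) := by simp [PySem.List.len_eq]; omega
  have h2 : ¬ (PySem.List.len rest < 2) := by simp [PySem.List.len_eq]; omega
  rw [if_neg h1, if_neg h2]
  rw [PySem.List.slice_to_neg_one, PySem.List.slice_to_neg_one]
  have hdl : (a :: rest).dropLast = a :: rest.dropLast := by
    cases rest with
    | nil => exact absurd rfl hne
    | cons b t => rfl
  have hdlne : rest.dropLast ≠ [] := by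
    have hlen : rest.dropLast.length = rest.length - 1 := List.length_dropLast
    intro hdn
    rw [hdn] at hlen
    simp at hlen
    omega
  rw [hdl, join_cons_of_ne_nil _ _ hdlne]
  rw [PySem.List.pyGetD_neg_one _ _ (by simp),
      PySem.List.pyGetD_neg_one _ _ hne]
  rw [List.getLast_cons hne]
  simp [String.append_assoc]

theorem virgulas_nil : virgulas [] = virgulas_alt [] := by decide

theorem virgulas_one (a : String) : virgulas [a] = virgulas_alt [a] := by
  unfold virgulas virgulas_alt
  have : PySem.List.len [a] = 1 := by simp [PySem.List.len_eq]
  rw [this]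
  rw [show PySem.List.pyRange 0 1 1 = [0] from by decide]
  apply String.toList_inj.mp
  simp [PySem.Str.join, PySem.Chars.join_singleton, PySem.List.pyGetD_zero_cons]

theorem virgulas_two (a b : String) : virgulas [a, b] = virgulas_alt [a, b] := by
  unfold virgulas virgulas_alt
  have : PySem.List.len [a, b] = 2 := by simp [PySem.List.len_eq]
  rw [this]
  rw [show PySem.List.pyRange 0 2 1 = [0, 1] from by decide]
  rw [show PySem.List.slice [a, b] none (some (-1)) = [a] from
    by rw [PySem.List.slice_to_neg_one]; rfl]
  apply String.toList_inj.mp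
  simp [PySem.Str.join, PySem.Chars.join_singleton, PySem.List.pyGetD, PySem.List.pyGet?,
        PySem.List.pyIdx?, String.append_assoc]

theorem virgulas_eq (lista : List String) : virgulas lista = virgulas_alt lista := by
  induction lista with
  | nil => exact virgulas_nil
  | cons a rest ih =>
    match rest, ih with
    | [], _ => exact virgulas_one a
    | [b], _ => exact virgulas_two a b
    | b :: c :: t, ih =>
      have h : 2 ≤ (b :: c :: t).length := by simp
      rw [virgulas_cons a _ h, virgulas_alt_cons a _ h, ih]

-- ===== VERDICT (by name: the statement is the Claim_ definition above) =====
theorem virgulas_spec : Claim_equal_virgulas := by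
  intro lista _
  unfold Spec_virgulas
  exact virgulas_eq lista
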